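-- pv_equiv track=rewrite | github.com/tac-tac-go/leetcode | 2515. Shortest Distance to Target String in a Circular Array.py | closetTarget
-- ===== SOURCE A (Python) =====
-- from typing import List
--
-- def closetTarget(words: List[str], target: str, startIndex: int) -> int:
--     if target not in set(words):
--         return -1
--     if words[startIndex] == target:
--         return 0
--
--     n = len(words)
--     words = words[:] + words + words[:]
--     startIndex += n
--
--     n = len(words)
--     res = n
--     i = startIndex
--     for i in range(startIndex, n):
--         if words[i] == target:
--             res = min(res, i - startIndex)
--             break
--     for i in range(startIndex, -1, -1):
--         if words[i] == target:
--             res = min(res, startIndex - i)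
--             break
--
--     return res
-- ===== SOURCE B (Python) =====
-- def closetTarget(words, target, startIndex):
--     n = len(words)
--     best = -1
--     for i, w in enumerate(words):
--         if w == target:
--             d = abs(i - startIndex)
--             d = min(d, n - d)
--             if best < 0 or d < best:
--                 best = d
--     return best
-- ===== Notes on version B (the rewrite author's own statement) =====
-- stated objective: simpler
-- what changed: One linear pass with the closed-form circular distance min(|i-start|, n-|i-start|) and a running best, replacing A's set build, array tripling and two separate break-scans; Pre_ restricts startIndex to the problem's natural domain 0 <= startIndex < len(words) when the target occurs (outside [-n,n) A raises IndexError, and for negative in-range startIndex A wraps via Python negative indexing, an index form the problem never specifies and on which the two readings can diverge).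
-- outside the precondition, e.g. on closetTarget(['a', 'b', 'x'], 'x', -3): A returns 2, B returns -2; on closetTarget(['a', 'b'], 'a', 5): A raises IndexError, B returns -3
import Mathlib
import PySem

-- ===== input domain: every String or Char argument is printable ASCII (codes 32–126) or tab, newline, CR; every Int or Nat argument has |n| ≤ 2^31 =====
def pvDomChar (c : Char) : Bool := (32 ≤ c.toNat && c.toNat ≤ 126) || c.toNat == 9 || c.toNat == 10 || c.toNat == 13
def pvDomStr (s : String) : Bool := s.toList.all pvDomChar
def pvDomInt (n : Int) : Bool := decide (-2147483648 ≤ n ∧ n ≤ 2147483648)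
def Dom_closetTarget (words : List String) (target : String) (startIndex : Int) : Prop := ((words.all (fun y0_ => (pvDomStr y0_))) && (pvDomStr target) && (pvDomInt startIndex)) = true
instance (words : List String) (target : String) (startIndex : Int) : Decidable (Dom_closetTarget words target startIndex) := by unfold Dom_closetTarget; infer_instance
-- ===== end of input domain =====

-- B replaces A's set build, array tripling and two break-scans by one linear pass with the
-- closed-form circular distance min(|i-start|, n-|i-start|) and a running best (objective: simpler).

-- ===== PORT A =====
-- first loop: 'for i in range(startIndex, n): if words[i] == target: res = min(res, i - startIndex); break'
def pvFwdScan (ws : List String) (t : String) (start res : Int) : List Int → Int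
  | [] => res
  | i :: rest =>
      if PySem.List.pyGetD ws i "" == t then min res (i - start) else pvFwdScan ws t start res rest

-- second loop: 'for i in range(startIndex, -1, -1): if words[i] == target: res = min(res, startIndex - i); break'
def pvBwdScan (ws : List String) (t : String) (start res : Int) : List Int → Int
  | [] => res
  | i :: rest =>
      if PySem.List.pyGetD ws i "" == t then min res (start - i) else pvBwdScan ws t start res rest

-- indexing inside the loops is always in range; words[startIndex] is in range whenever this
-- branch is reached under Pre_, so the pyGetD defaults are never consulted there
def closetTarget (words : List String) (target : String) (startIndex : Int) : Int :=
  if !(PySem.Set.contains (PySem.Set.ofList words) target) then -1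
  else if PySem.List.pyGetD words startIndex "" == target then 0
  else
    let n : Int := words.length
    let ws := PySem.List.slice words none none ++ words ++ PySem.List.slice words none none
    let start := startIndex + n
    let n2 : Int := ws.length
    let res : Int := n2
    let res := pvFwdScan ws target start res (PySem.List.pyRange start n2 1)
    pvBwdScan ws target start res (PySem.List.pyRange start (-1) (-1))

-- ===== PORT B =====
def closetTarget_alt (words : List String) (target : String) (startIndex : Int) : Int :=
  let n : Int := words.length
  (PySem.List.enumerate words 0).foldl
    (fun best iw =>
      if iw.2 == target then
        let d := |iw.1 - startIndex|
        let d := min d (n - d)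
        if best < 0 || d < best then d else best
      else best) (-1)

-- ===== PRECONDITION & SPEC =====
-- Pre_ restricts startIndex to the problem's natural domain 0 ≤ startIndex < len(words) whenever the
-- target occurs: outside [-n, n) A raises IndexError there, and for negative in-range startIndex
-- (Python wraparound indexing, an index form the problem never specifies) the two readings diverge.
def Pre_closetTarget (words : List String) (target : String) (startIndex : Int) : Prop :=
  target ∈ words → 0 ≤ startIndex ∧ startIndex < words.length
instance (words : List String) (target : String) (startIndex : Int) : Decidable (Pre_closetTarget words target startIndex) := by unfold Pre_closetTarget; infer_instance

def pvWitness_closetTarget : List String × String × Int := (["a", "b", "c"], "c", 1)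

def Spec_closetTarget (words : List String) (target : String) (startIndex : Int) (out : Int) : Prop := out = closetTarget_alt words target startIndex
instance (words : List String) (target : String) (startIndex : Int) (out : Int) : Decidable (Spec_closetTarget words target startIndex out) := by unfold Spec_closetTarget; infer_instance

-- ===== CLAIM (what is proved, stated in full; the proofs are below) =====
def Claim_equal_closetTarget : Prop := ∀ (words : List String) (target : String) (startIndex : Int), Dom_closetTarget words target startIndex → Pre_closetTarget words target startIndex → Spec_closetTarget words target startIndex (closetTarget words target startIndex)

-- ===== LEMMAS AND PROOFS =====
lemma pv_find?_range (P : Nat → Bool) (m j : Nat) (hj : j < m) (hP : P j = true)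
    (hmin : ∀ k, k < j → P k = false) : (List.range m).find? P = some j := by
  induction m with
  | zero => omega
  | succ m ih =>
      rw [List.range_succ, List.find?_append]
      rcases Nat.lt_or_ge j m with h | h
      · rw [ih h]; rfl
      · have hjm : j = m := by omega
        subst hjm
        have : (List.range j).find? P = none := by
          rw [List.find?_eq_none]
          intro x hx
          simp only [List.mem_range] at hx
          simp [hmin x hx]
        rw [this]
        simp [List.find?, hP]

lemma pv_getD3 (w : List String) (q : Nat) :
    (w ++ w ++ w).getD q "" =
      if q < w.length then w.getD q ""
      else if q < 2 * w.length then w.getD (q - w.length) ""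
      else w.getD (q - 2 * w.length) "" := by
  split_ifs with h1 h2
  · rw [List.getD_append _ _ _ _ (by simp [List.length_append]; omega), List.getD_append _ _ _ _ h1]
  · rw [List.getD_append]
    · rw [List.getD_append_right _ _ _ _ (by omega)]
    · simp [List.length_append]; omega
  · rw [List.getD_append_right _ _ _ _ (by simp [List.length_append]; omega)]
    congr 1
    simp [List.length_append]; omega

lemma pv_find?_map {α β : Type} (l : List α) (f : α → β) (p : β → Bool) :
    (l.map f).find? p = (l.find? (fun x => p (f x))).map f := by
  induction l with
  | nil => rfl
  | cons a l ih => by_cases h : p (f a) = true <;> simp [List.find?, h, ih]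

lemma pv_fold_pos {α : Type} (p : α → Bool) (v : α → Int) (l : List α) (acc : Int)
    (h0 : ∀ x ∈ l, p x = true → 0 ≤ v x) (ha : 0 ≤ acc) :
    l.foldl (fun best x => if p x then (if best < 0 || v x < best then v x else best) else best) acc
      = ((l.filter p).map v).foldl min acc := by
  induction l generalizing acc with
  | nil => rfl
  | cons a l ih =>
      by_cases h : p a = true
      · have hv : 0 ≤ v a := h0 a (by simp) h
        have hstep : (if acc < 0 || v a < acc then v a else acc) = min acc (v a) := by
          have : ¬ acc < 0 := by omega
          simp only [this, decide_false, Bool.false_or, decide_eq_true_eq]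
          split_ifs <;> omega
        simp only [List.foldl_cons, List.filter_cons, h, if_pos, List.map_cons, hstep]
        exact ih (min acc (v a)) (fun x hx => h0 x (by simp [hx])) (by omega)
      · simp only [Bool.not_eq_true] at h
        simp only [List.foldl_cons, List.filter_cons, h, Bool.false_eq_true]
        exact ih acc (fun x hx => h0 x (by simp [hx])) ha

lemma pv_fold_neg {α : Type} (p : α → Bool) (v : α → Int) (l : List α)
    (h0 : ∀ x ∈ l, p x = true → 0 ≤ v x) :
    l.foldl (fun best x => if p x then (if best < 0 || v x < best then v x else best) else best) (-1)
      = (match (l.filter p).map v with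
         | [] => (-1 : Int)
         | c :: cs => cs.foldl min c) := by
  induction l with
  | nil => rfl
  | cons a l ih =>
      by_cases h : p a = true
      · have hv : 0 ≤ v a := h0 a (by simp) h
        simp only [List.foldl_cons, List.filter_cons, h, if_pos, List.map_cons]
        have : (if (-1 : Int) < 0 || v a < -1 then v a else -1) = v a := by norm_num
        rw [this]
        exact pv_fold_pos p v l (v a) (fun x hx => h0 x (by simp [hx])) hv
      · simp only [Bool.not_eq_true] at h
        simp only [List.foldl_cons, List.filter_cons, h, Bool.false_eq_true]
        exact ih (fun x hx => h0 x (by simp [hx]))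

lemma pv_foldl_min_map_min (F G : Nat → Int) (l : List Nat) :
    ∀ (x y : Int), (l.map (fun i => min (F i) (G i))).foldl min (min x y)
      = min ((l.map F).foldl min x) ((l.map G).foldl min y) := by
  induction l with
  | nil => intro x y; rfl
  | cons a l ih =>
      intro x y
      simp only [List.map_cons, List.foldl_cons]
      rw [show min (min x y) (min (F a) (G a)) = min (min x (F a)) (min y (G a)) by omega]
      exact ih (min x (F a)) (min y (G a))

lemma pv_foldl_min_cast (f : Nat → Nat) (l : List Nat) :
    ∀ (a : Nat), (l.map (fun i => ((f i : Nat) : Int))).foldl min ((a : Nat) : Int)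
      = (((l.map f).foldl min a : Nat) : Int) := by
  induction l with
  | nil => intro a; rfl
  | cons b l ih =>
      intro a
      simp only [List.map_cons, List.foldl_cons]
      rw [show (min (↑a) (↑(f b)) : Int) = ((min a (f b) : Nat) : Int) by push_cast; rfl]
      exact ih (min a (f b))

def pvMatches (w : List String) (t : String) : List Nat :=
  (List.range w.length).filter (fun i => w.getD i "" == t)

def pvFo (sn N i : Nat) : Nat := if sn ≤ i then i - sn else i + N - sn
def pvBo (sn N i : Nat) : Nat := if i ≤ sn then sn - i else sn + N - i
def pvCd (s n i : Int) : Int := min |i - s| (n - |i - s|)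

def pvJ (w : List String) (t : String) (sn : Nat) : Nat :=
  match pvMatches w t with
  | [] => 0
  | i0 :: rest => (rest.map (pvFo sn w.length)).foldl min (pvFo sn w.length i0)

def pvK (w : List String) (t : String) (sn : Nat) : Nat :=
  match pvMatches w t with
  | [] => 0
  | i0 :: rest => (rest.map (pvBo sn w.length)).foldl min (pvBo sn w.length i0)

lemma pv_mem_matches {w : List String} {t : String} {i : Nat} :
    i ∈ pvMatches w t ↔ i < w.length ∧ w.getD i "" = t := by
  simp [pvMatches]

lemma pv_fo_lt {sn N i : Nat} (hi : i < N) (hs : sn < N) : pvFo sn N i < N := by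
  unfold pvFo; split_ifs <;> omega

lemma pv_bo_lt {sn N i : Nat} (hi : i < N) (hs : sn < N) : pvBo sn N i < N := by
  unfold pvBo; split_ifs <;> omega

-- the fold returns an achieved value and a lower bound
lemma pv_minfold_spec (f : Nat → Nat) (i0 : Nat) (rest : List Nat) :
    (∃ i ∈ i0 :: rest, (rest.map f).foldl min (f i0) = f i) ∧
      (∀ i ∈ i0 :: rest, (rest.map f).foldl min (f i0) ≤ f i) := by
  constructor
  · rcases PySem.List.foldl_min_mem (rest.map f) (f i0) with h | h
    · exact ⟨i0, by simp, h⟩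
    · rcases List.mem_map.mp h with ⟨i, hi, hv⟩
      exact ⟨i, by simp [hi], hv.symm⟩
  · intro i hi
    rcases List.mem_cons.mp hi with rfl | hi
    · exact (PySem.List.foldl_min_le (rest.map f) (f i)).1
    · exact (PySem.List.foldl_min_le (rest.map f) (f i0)).2 _ (List.mem_map_of_mem hi)

lemma pv_J_spec (w : List String) (t : String) (sn : Nat) (hM : pvMatches w t ≠ []) :
    (∃ i ∈ pvMatches w t, pvJ w t sn = pvFo sn w.length i) ∧
      (∀ i ∈ pvMatches w t, pvJ w t sn ≤ pvFo sn w.length i) := by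
  rcases h : pvMatches w t with _ | ⟨i0, rest⟩
  · exact absurd h hM
  · have hJ : pvJ w t sn = (rest.map (pvFo sn w.length)).foldl min (pvFo sn w.length i0) := by
      unfold pvJ; rw [h]
    rw [hJ]
    exact pv_minfold_spec (pvFo sn w.length) i0 rest

lemma pv_K_spec (w : List String) (t : String) (sn : Nat) (hM : pvMatches w t ≠ []) :
    (∃ i ∈ pvMatches w t, pvK w t sn = pvBo sn w.length i) ∧
      (∀ i ∈ pvMatches w t, pvK w t sn ≤ pvBo sn w.length i) := by
  rcases h : pvMatches w t with _ | ⟨i0, rest⟩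
  · exact absurd h hM
  · have hK : pvK w t sn = (rest.map (pvBo sn w.length)).foldl min (pvBo sn w.length i0) := by
      unfold pvK; rw [h]
    rw [hK]
    exact pv_minfold_spec (pvBo sn w.length) i0 rest

lemma pv_J_lt (w : List String) (t : String) (sn : Nat) (hM : pvMatches w t ≠ [])
    (hs : sn < w.length) : pvJ w t sn < w.length := by
  obtain ⟨⟨i, hi, hJ⟩, -⟩ := pv_J_spec w t sn hM
  rw [hJ]; exact pv_fo_lt (pv_mem_matches.mp hi).1 hs

lemma pv_K_lt (w : List String) (t : String) (sn : Nat) (hM : pvMatches w t ≠ [])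
    (hs : sn < w.length) : pvK w t sn < w.length := by
  obtain ⟨⟨i, hi, hK⟩, -⟩ := pv_K_spec w t sn hM
  rw [hK]; exact pv_bo_lt (pv_mem_matches.mp hi).1 hs

lemma pv_iF_lt {sn N k : Nat} (hs : sn < N) (hk : k < N) :
    (if sn + k < N then sn + k else sn + k - N) < N := by split_ifs <;> omega

lemma pv_fo_iF {sn N k : Nat} (hs : sn < N) (hk : k < N) :
    pvFo sn N (if sn + k < N then sn + k else sn + k - N) = k := by
  unfold pvFo; split_ifs <;> omega

lemma pv_iF_fo {sn N i : Nat} (hs : sn < N) (hi : i < N) :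
    (if sn + pvFo sn N i < N then sn + pvFo sn N i else sn + pvFo sn N i - N) = i := by
  unfold pvFo; split_ifs <;> omega

lemma pv_iB_lt {sn N k : Nat} (hs : sn < N) (hk : k < N) :
    (if k ≤ sn then sn - k else sn + N - k) < N := by split_ifs <;> omega

lemma pv_bo_iB {sn N k : Nat} (hs : sn < N) (hk : k < N) :
    pvBo sn N (if k ≤ sn then sn - k else sn + N - k) = k := by
  unfold pvBo; split_ifs <;> omega

lemma pv_iB_bo {sn N i : Nat} (hs : sn < N) (hi : i < N) :
    (if pvBo sn N i ≤ sn then sn - pvBo sn N i else sn + N - pvBo sn N i) = i := by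
  unfold pvBo; split_ifs <;> omega

lemma pv_hitF (w : List String) (t : String) (sn k : Nat) (_hs : sn < w.length)
    (_hk : k < w.length) :
    (PySem.List.pyGetD (w ++ w ++ w) ((sn : Int) + w.length + k) "" == t)
      = (w.getD (if sn + k < w.length then sn + k else sn + k - w.length) "" == t) := by
  have h1 : ((sn : Int) + w.length + k) = ((sn + w.length + k : Nat) : Int) := by push_cast; ring
  rw [h1, PySem.List.pyGetD_natCast, pv_getD3]
  have hq : ¬ (sn + w.length + k < w.length) := by omega
  rw [if_neg hq]
  split_ifs with h2 h3 <;> (congr 2; omega)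

lemma pv_hitB (w : List String) (t : String) (sn k : Nat) (hs : sn < w.length)
    (hk : k < w.length) :
    (PySem.List.pyGetD (w ++ w ++ w) ((sn : Int) + w.length - k) "" == t)
      = (w.getD (if k ≤ sn then sn - k else sn + w.length - k) "" == t) := by
  have h1 : ((sn : Int) + w.length - k) = ((sn + w.length - k : Nat) : Int) := by
    have : k ≤ sn + w.length := by omega
    push_cast [this]; ring
  rw [h1, PySem.List.pyGetD_natCast, pv_getD3]
  split_ifs with h2 h3 h4 <;> (congr 2 <;> omega)

lemma pv_matches_of_hit {w : List String} {t : String} {i : Nat} (hi : i < w.length)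
    (h : (w.getD i "" == t) = true) : i ∈ pvMatches w t :=
  pv_mem_matches.mpr ⟨hi, by simpa using h⟩

lemma pv_fwd_find (w : List String) (t : String) (sn : Nat) (hs : sn < w.length)
    (hM : pvMatches w t ≠ []) :
    (PySem.List.pyRange ((sn : Int) + w.length) (3 * w.length) 1).find?
        (fun i => PySem.List.pyGetD (w ++ w ++ w) i "" == t)
      = some ((sn : Int) + w.length + pvJ w t sn) := by
  rw [PySem.List.pyRange_one, pv_find?_map]
  have hm : ((3 * (w.length : Int)) - ((sn : Int) + w.length)).toNat = 2 * w.length - sn := by omega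
  rw [hm]
  have hJN : pvJ w t sn < w.length := pv_J_lt w t sn hM hs
  have hfind : (List.range (2 * w.length - sn)).find?
      (fun k : Nat => PySem.List.pyGetD (w ++ w ++ w) ((sn : Int) + w.length + (k : Int)) "" == t)
      = some (pvJ w t sn) := by
    apply pv_find?_range _ _ _ (by omega)
    · obtain ⟨⟨i, hi, hJ⟩, -⟩ := pv_J_spec w t sn hM
      obtain ⟨hiN, hit⟩ := pv_mem_matches.mp hi
      rw [pv_hitF w t sn _ hs hJN]
      have : (if sn + pvJ w t sn < w.length then sn + pvJ w t sn else sn + pvJ w t sn - w.length) = i := by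
        rw [hJ]; exact pv_iF_fo hs hiN
      rw [this]
      simpa using hit
    · intro k hk
      have hkN : k < w.length := by omega
      rw [pv_hitF w t sn k hs hkN]
      by_contra hfalse
      have hhit : (w.getD (if sn + k < w.length then sn + k else sn + k - w.length) "" == t) = true := by
        simpa using hfalse
      have hmem := pv_matches_of_hit (pv_iF_lt hs hkN) hhit
      have := (pv_J_spec w t sn hM).2 _ hmem
      rw [pv_fo_iF hs hkN] at this
      omega
  rw [hfind]
  rfl

lemma pv_bwd_find (w : List String) (t : String) (sn : Nat) (hs : sn < w.length)
    (hM : pvMatches w t ≠ []) :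
    (PySem.List.pyRange ((sn : Int) + w.length) (-1) (-1)).find?
        (fun i => PySem.List.pyGetD (w ++ w ++ w) i "" == t)
      = some ((sn : Int) + w.length - pvK w t sn) := by
  rw [PySem.List.pyRange_neg_one, pv_find?_map]
  have hm : (((sn : Int) + w.length) - (-1)).toNat = sn + w.length + 1 := by omega
  rw [hm]
  have hKN : pvK w t sn < w.length := pv_K_lt w t sn hM hs
  have hfind : (List.range (sn + w.length + 1)).find?
      (fun k : Nat => PySem.List.pyGetD (w ++ w ++ w) ((sn : Int) + w.length - (k : Int)) "" == t)
      = some (pvK w t sn) := by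
    apply pv_find?_range _ _ _ (by omega)
    · obtain ⟨⟨i, hi, hK⟩, -⟩ := pv_K_spec w t sn hM
      obtain ⟨hiN, hit⟩ := pv_mem_matches.mp hi
      rw [pv_hitB w t sn _ hs hKN]
      have : (if pvK w t sn ≤ sn then sn - pvK w t sn else sn + w.length - pvK w t sn) = i := by
        rw [hK]; exact pv_iB_bo hs hiN
      rw [this]
      simpa using hit
    · intro k hk
      have hkN : k < w.length := by omega
      rw [pv_hitB w t sn k hs hkN]
      by_contra hfalse
      have hhit : (w.getD (if k ≤ sn then sn - k else sn + w.length - k) "" == t) = true := by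
        simpa using hfalse
      have hmem := pv_matches_of_hit (pv_iB_lt hs hkN) hhit
      have := (pv_K_spec w t sn hM).2 _ hmem
      rw [pv_bo_iB hs hkN] at this
      omega
  rw [hfind]
  rfl

lemma pv_alt_eq (w : List String) (t : String) (s : Int)
    (h0 : ∀ i ∈ pvMatches w t, 0 ≤ pvCd s w.length (i : Int)) :
    closetTarget_alt w t s =
      (match (pvMatches w t).map (fun i : Nat => pvCd s w.length (i : Int)) with
       | [] => (-1 : Int)
       | c :: cs => cs.foldl min c) := by
  simp only [closetTarget_alt]
  rw [PySem.List.enumerate_eq_map_pyRange w "", List.foldl_map]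
  have hlen : PySem.List.len w = (w.length : Int) := rfl
  rw [hlen, PySem.List.pyRange_zero_nat, List.foldl_map]
  simp only [PySem.List.pyGetD_natCast]
  rw [pv_fold_neg (fun i : Nat => w.getD i "" == t)
    (fun i : Nat => min |(i : Int) - s| ((w.length : Int) - |(i : Int) - s|))
    (List.range w.length)
    (by
      intro i hi hp
      exact h0 i (pv_matches_of_hit (List.mem_range.mp hi) hp))]
  rfl

lemma pv_cd_nonneg {s : Int} {N i : Nat} (hs0 : 0 ≤ s) (hsN : s < (N : Int)) (hi : i < N) :
    0 ≤ pvCd s (N : Int) (i : Int) := by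
  unfold pvCd
  have h1 : |(i : Int) - s| ≤ (N : Int) := abs_le.mpr ⟨by omega, by omega⟩
  exact le_min (abs_nonneg _) (by omega)

lemma pv_cd_eq (sn N i : Nat) (hs : sn < N) (hi : i < N) :
    pvCd (sn : Int) (N : Int) (i : Int)
      = min ((pvFo sn N i : Nat) : Int) ((pvBo sn N i : Nat) : Int) := by
  unfold pvCd pvFo pvBo
  rcases Nat.lt_or_ge i sn with h | h
  · rw [abs_of_neg (by omega : ((i : Int) - sn) < 0)]
    split_ifs <;> omega
  · rw [abs_of_nonneg (by omega : (0 : Int) ≤ (i : Int) - sn)]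
    split_ifs <;> omega

lemma pv_matches_mem_lt {w : List String} {t : String} {i : Nat} (h : i ∈ pvMatches w t) :
    i < w.length := (pv_mem_matches.mp h).1

lemma pv_alt_val (w : List String) (t : String) (sn : Nat) (hs : sn < w.length)
    (hM : pvMatches w t ≠ []) :
    closetTarget_alt w t (sn : Int)
      = min ((pvJ w t sn : Nat) : Int) ((pvK w t sn : Nat) : Int) := by
  rw [pv_alt_eq w t (sn : Int)
    (fun i hi => pv_cd_nonneg (by omega) (by exact_mod_cast hs) (pv_matches_mem_lt hi))]
  rcases h : pvMatches w t with _ | ⟨i0, rest⟩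
  · exact absurd h hM
  · have hmem : ∀ i ∈ i0 :: rest, i < w.length := fun i hi =>
      pv_matches_mem_lt (h ▸ hi)
    have hJ : pvJ w t sn = (rest.map (pvFo sn w.length)).foldl min (pvFo sn w.length i0) := by
      unfold pvJ; rw [h]
    have hK : pvK w t sn = (rest.map (pvBo sn w.length)).foldl min (pvBo sn w.length i0) := by
      unfold pvK; rw [h]
    rw [List.map_congr_left (fun i hi => pv_cd_eq sn w.length i hs (hmem i hi))]
    simp only [List.map_cons]
    rw [pv_foldl_min_map_min (fun i => ((pvFo sn w.length i : Nat) : Int))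
      (fun i => ((pvBo sn w.length i : Nat) : Int)) rest,
      pv_foldl_min_cast (pvFo sn w.length) rest (pvFo sn w.length i0),
      pv_foldl_min_cast (pvBo sn w.length) rest (pvBo sn w.length i0), hJ, hK]

lemma pv_fwdScan_eq (ws : List String) (t : String) (start res : Int) (idxs : List Int) :
    pvFwdScan ws t start res idxs =
      match idxs.find? (fun i => PySem.List.pyGetD ws i "" == t) with
      | none => res
      | some i => min res (i - start) := by
  induction idxs with
  | nil => rfl
  | cons i rest ih =>
      by_cases h : (PySem.List.pyGetD ws i "" == t) = true
      · simp [pvFwdScan, List.find?, h]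
      · simp only [Bool.not_eq_true] at h
        simp [pvFwdScan, List.find?, h, ih]

lemma pv_bwdScan_eq (ws : List String) (t : String) (start res : Int) (idxs : List Int) :
    pvBwdScan ws t start res idxs =
      match idxs.find? (fun i => PySem.List.pyGetD ws i "" == t) with
      | none => res
      | some i => min res (start - i) := by
  induction idxs with
  | nil => rfl
  | cons i rest ih =>
      by_cases h : (PySem.List.pyGetD ws i "" == t) = true
      · simp [pvBwdScan, List.find?, h]
      · simp only [Bool.not_eq_true] at h
        simp [pvBwdScan, List.find?, h, ih]

theorem pv_main (w : List String) (t : String) (s : Int)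
    (hpre : t ∈ w → 0 ≤ s ∧ s < w.length) :
    closetTarget w t s = closetTarget_alt w t s := by
  by_cases ht : t ∈ w
  · obtain ⟨hs0, hsN'⟩ := hpre ht
    obtain ⟨sn, rfl⟩ : ∃ sn : Nat, ((sn : Nat) : Int) = s := ⟨s.toNat, Int.toNat_of_nonneg hs0⟩
    have hs : sn < w.length := by exact_mod_cast hsN'
    have hM : pvMatches w t ≠ [] := by
      obtain ⟨k, hk, hkt⟩ := List.mem_iff_getElem.mp ht
      intro hnil
      have : k ∈ pvMatches w t :=
        pv_mem_matches.mpr ⟨hk, by rw [List.getD_eq_getElem w "" hk, hkt]⟩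
      simp [hnil] at this
    have hc : PySem.Set.contains (PySem.Set.ofList w) t = true :=
      (PySem.Set.contains_iff _ _).mpr ((PySem.Set.mem_ofList _ _).mpr ht)
    have halt := pv_alt_val w t sn hs hM
    have hJN := pv_J_lt w t sn hM hs
    have hKN := pv_K_lt w t sn hM hs
    by_cases h0 : w.getD sn "" = t
    · have hb2 : (PySem.List.pyGetD w ((sn : Nat) : Int) "" == t) = true := by
        rw [PySem.List.pyGetD_natCast, List.getD_eq_getElem?_getD] at *; simp [h0]
      have hA : closetTarget w t ((sn : Nat) : Int) = 0 := by
        simp only [closetTarget, hc, hb2, Bool.not_true, Bool.false_eq_true, if_false]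
        simp
      rw [hA, halt]
      have hle := (pv_J_spec w t sn hM).2 sn (pv_mem_matches.mpr ⟨hs, h0⟩)
      have hfo : pvFo sn w.length sn = 0 := by unfold pvFo; simp
      omega
    · have hb : (PySem.List.pyGetD w ((sn : Nat) : Int) "" == t) = false := by
        rw [PySem.List.pyGetD_natCast, List.getD_eq_getElem?_getD] at *; simp [h0]
      have h3 : (((w ++ w ++ w).length : Nat) : Int) = 3 * (w.length : Int) := by
        push_cast [List.length_append]; ring
      have hA : closetTarget w t ((sn : Nat) : Int)
          = min (min (3 * (w.length : Int)) ((pvJ w t sn : Nat) : Int)) ((pvK w t sn : Nat) : Int) := by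
        simp only [closetTarget, hc, hb, Bool.not_true, Bool.false_eq_true, if_false,
          PySem.List.slice_none_none]
        rw [h3, pv_fwdScan_eq, pv_fwd_find w t sn hs hM, pv_bwdScan_eq, pv_bwd_find w t sn hs hM]
        dsimp only
        rw [add_sub_cancel_left, sub_sub_cancel]
      rw [hA, halt]
      have hJ3 : ((pvJ w t sn : Nat) : Int) ≤ 3 * (w.length : Int) := by omega
      rw [min_eq_right hJ3]
  · have hM : pvMatches w t = [] := by
      unfold pvMatches
      rw [List.filter_eq_nil_iff]
      intro i hi
      have hiN := List.mem_range.mp hi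
      rw [List.getD_eq_getElem w "" hiN]
      simp only [beq_iff_eq, ne_eq]
      intro heq
      exact ht (heq ▸ List.getElem_mem hiN)
    have halt : closetTarget_alt w t s = -1 := by
      rw [pv_alt_eq w t s (fun i hi => absurd hi (by simp [hM])), hM]
      rfl
    rw [halt]
    simp [closetTarget, ht]

-- ===== VERDICT (by name: the statement is the Claim_ definition above) =====
theorem closetTarget_spec : Claim_equal_closetTarget := by
  intro w t s _ hpre
  unfold Spec_closetTarget
  exact pv_main w t s (by unfold Pre_closetTarget at hpre; exact hpre)
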